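-- pv_equiv track=rewrite | github.com/pgarlap/FHIR-ETL-pipeline | auth/tasks/visualization/gender_distribution.py | analyze_gender_distribution
-- ===== SOURCE A (Python) =====
-- def analyze_gender_distribution(patients):
--     """
--     Analyze gender distribution across
--     all retrieved patient resources.
--     """
--     gender_counts = {
--         "Male": 0,
--         "Female": 0,
--         "Other": 0,
--         "Unknown": 0
--     }
--
--     for patient in patients:
--         gender = patient.get("gender", "unknown").lower()
--         if gender == "male":
--             gender_counts["Male"] += 1
--         elif gender == "female":
--             gender_counts["Female"] += 1
--         elif gender == "other":
--             gender_counts["Other"] += 1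
--         else:
--             gender_counts["Unknown"] += 1
--
--     return gender_counts
-- ===== SOURCE B (Python) =====
-- def analyze_gender_distribution(patients):
--     def g(p):
--         return p.get("gender", "unknown").lower()
--     return {
--         "Male": sum(1 for p in patients if g(p) == "male"),
--         "Female": sum(1 for p in patients if g(p) == "female"),
--         "Other": sum(1 for p in patients if g(p) == "other"),
--         "Unknown": sum(1 for p in patients if g(p) not in ("male", "female", "other")),
--     }
-- ===== Notes on version B (the rewrite author's own statement) =====
-- stated objective: simpler
-- what changed: B replaces the single branching tally loop over a mutable counts dict with four independent per-category counts (one sum per label, Unknown counted as 'not one of the three'), assembled directly into the result dict literal.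
import Mathlib
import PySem

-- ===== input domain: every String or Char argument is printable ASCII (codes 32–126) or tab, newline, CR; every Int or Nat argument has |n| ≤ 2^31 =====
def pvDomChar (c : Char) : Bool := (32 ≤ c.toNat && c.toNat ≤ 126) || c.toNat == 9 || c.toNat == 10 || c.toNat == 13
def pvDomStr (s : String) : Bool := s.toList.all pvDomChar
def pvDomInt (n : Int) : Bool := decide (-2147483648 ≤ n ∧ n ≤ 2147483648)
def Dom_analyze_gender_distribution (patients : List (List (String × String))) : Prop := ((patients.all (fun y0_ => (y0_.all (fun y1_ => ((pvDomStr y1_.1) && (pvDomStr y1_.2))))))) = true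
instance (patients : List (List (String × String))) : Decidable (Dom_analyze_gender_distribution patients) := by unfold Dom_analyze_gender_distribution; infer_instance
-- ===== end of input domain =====

-- B replaces A's single branching tally loop over a mutable counts dict with four independent
-- per-category counts assembled directly into the result (objective: simpler).


-- ===== PORT A =====
-- patient.get("gender", "unknown").lower(); shared literal subexpression of both ports
def pvGender (p : List (String × String)) : String :=
  PySem.Str.lower ((PySem.Dict.mk p).getD "gender" "unknown")

def analyze_gender_distribution (patients : List (List (String × String))) : List (String × Int) :=
  (patients.foldl (fun d patient =>
      let gender := pvGender patient
      if gender = "male" then d.insert "Male" (d.getD "Male" 0 + 1)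
      else if gender = "female" then d.insert "Female" (d.getD "Female" 0 + 1)
      else if gender = "other" then d.insert "Other" (d.getD "Other" 0 + 1)
      else d.insert "Unknown" (d.getD "Unknown" 0 + 1))
    (PySem.Dict.mk [("Male", 0), ("Female", 0), ("Other", 0), ("Unknown", 0)])).items

-- ===== PORT B =====
def analyze_gender_distribution_alt (patients : List (List (String × String))) : List (String × Int) :=
  [("Male", (patients.countP (fun p => pvGender p == "male") : Int)),
   ("Female", (patients.countP (fun p => pvGender p == "female") : Int)),
   ("Other", (patients.countP (fun p => pvGender p == "other") : Int)),
   ("Unknown", (patients.countP (fun p =>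
      !(pvGender p == "male" || pvGender p == "female" || pvGender p == "other")) : Int))]

-- ===== PRECONDITION & SPEC =====
def Spec_analyze_gender_distribution (patients : List (List (String × String))) (out : List (String × Int)) : Prop := out = analyze_gender_distribution_alt patients
instance (patients : List (List (String × String))) (out : List (String × Int)) : Decidable (Spec_analyze_gender_distribution patients out) := by unfold Spec_analyze_gender_distribution; infer_instance

-- ===== CLAIM (what is proved, stated in full; the proofs are below) =====
def Claim_equal_analyze_gender_distribution : Prop := ∀ (patients : List (List (String × String))), Dom_analyze_gender_distribution patients → Spec_analyze_gender_distribution patients (analyze_gender_distribution patients)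

-- ===== LEMMAS AND PROOFS =====

-- Loop invariant: folding A's body over l onto the literal 4-key dict adds the four category counts.
theorem pvLoopA (l : List (List (String × String))) (a b c d : Int) :
    (l.foldl (fun d patient =>
      let gender := pvGender patient
      if gender = "male" then d.insert "Male" (d.getD "Male" 0 + 1)
      else if gender = "female" then d.insert "Female" (d.getD "Female" 0 + 1)
      else if gender = "other" then d.insert "Other" (d.getD "Other" 0 + 1)
      else d.insert "Unknown" (d.getD "Unknown" 0 + 1))
      (PySem.Dict.mk [("Male", a), ("Female", b), ("Other", c), ("Unknown", d)])) =
    PySem.Dict.mk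
      [("Male", a + (l.countP (fun p => pvGender p == "male") : Int)),
       ("Female", b + (l.countP (fun p => pvGender p == "female") : Int)),
       ("Other", c + (l.countP (fun p => pvGender p == "other") : Int)),
       ("Unknown", d + (l.countP (fun p =>
          !(pvGender p == "male" || pvGender p == "female" || pvGender p == "other")) : Int))] := by
  induction l generalizing a b c d with
  | nil => simp
  | cons p t ih =>
    simp only [List.foldl_cons, List.countP_cons]
    by_cases h1 : pvGender p = "male"
    · rw [if_pos h1]
      have : (PySem.Dict.mk [("Male", a), ("Female", b), ("Other", c), ("Unknown", d)]).insert "Male"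
          ((PySem.Dict.mk [("Male", a), ("Female", b), ("Other", c), ("Unknown", d)]).getD "Male" 0 + 1) =
          PySem.Dict.mk [("Male", a + 1), ("Female", b), ("Other", c), ("Unknown", d)] := by
        simp [PySem.Dict.insert, PySem.Dict.getD, PySem.Dict.get?, PySem.Dict.contains]
      rw [this, ih]
      simp [h1, add_comm, add_assoc]
    · rw [if_neg h1]
      by_cases h2 : pvGender p = "female"
      · rw [if_pos h2]
        have : (PySem.Dict.mk [("Male", a), ("Female", b), ("Other", c), ("Unknown", d)]).insert "Female"
            ((PySem.Dict.mk [("Male", a), ("Female", b), ("Other", c), ("Unknown", d)]).getD "Female" 0 + 1) =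
            PySem.Dict.mk [("Male", a), ("Female", b + 1), ("Other", c), ("Unknown", d)] := by
          simp [PySem.Dict.insert, PySem.Dict.getD, PySem.Dict.get?, PySem.Dict.contains]
        rw [this, ih]
        simp [h1, h2, add_comm, add_assoc]
      · rw [if_neg h2]
        by_cases h3 : pvGender p = "other"
        · rw [if_pos h3]
          have : (PySem.Dict.mk [("Male", a), ("Female", b), ("Other", c), ("Unknown", d)]).insert "Other"
              ((PySem.Dict.mk [("Male", a), ("Female", b), ("Other", c), ("Unknown", d)]).getD "Other" 0 + 1) =
              PySem.Dict.mk [("Male", a), ("Female", b), ("Other", c + 1), ("Unknown", d)] := by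
            simp [PySem.Dict.insert, PySem.Dict.getD, PySem.Dict.get?, PySem.Dict.contains]
          rw [this, ih]
          simp [h1, h2, h3, add_comm, add_assoc]
        · rw [if_neg h3]
          have : (PySem.Dict.mk [("Male", a), ("Female", b), ("Other", c), ("Unknown", d)]).insert "Unknown"
              ((PySem.Dict.mk [("Male", a), ("Female", b), ("Other", c), ("Unknown", d)]).getD "Unknown" 0 + 1) =
              PySem.Dict.mk [("Male", a), ("Female", b), ("Other", c), ("Unknown", d + 1)] := by
            simp [PySem.Dict.insert, PySem.Dict.getD, PySem.Dict.get?, PySem.Dict.contains]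
          rw [this, ih]
          simp [h1, h2, h3, add_comm, add_assoc]

-- ===== VERDICT (by name: the statement is the Claim_ definition above) =====
theorem analyze_gender_distribution_spec : Claim_equal_analyze_gender_distribution := by
  intro patients _
  unfold Spec_analyze_gender_distribution analyze_gender_distribution analyze_gender_distribution_alt
  rw [pvLoopA]
  simp
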